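-- pv_equiv track=rewrite | github.com/pd0wm/exercises | advent_of_code_2020/solve_13.py | get_wait_time
-- ===== SOURCE A (Python) =====
-- def get_wait_time(busses, ts0):
--     ts = ts0
--
--     while True:
--         for b in busses:
--             if b == -1:
--                 continue
--             if ts % b == 0:
--                 return b * (ts - ts0)
--
--         ts += 1
-- ===== SOURCE B (Python) =====
-- def get_wait_time(busses, ts0):
--     best = None
--     for b in busses:
--         if b == -1:
--             continue
--         w = (-ts0) % abs(b)
--         if best is None or w < best[0]:
--             best = (w, b)
--     return best[1] * best[0]
-- ===== Notes on version B (the rewrite author's own statement) =====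
-- stated objective: faster
-- what changed: Replaces A's timestamp-by-timestamp search loop by a single pass computing each bus's wait as (-ts0) % abs(b) and keeping the first minimum.
-- outside the precondition, e.g. on get_wait_time([2, 0], 4): A returns 0, B raises ZeroDivisionError; on get_wait_time([-1], 0): A does not finish within the time limit, B raises TypeError
import Mathlib
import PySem

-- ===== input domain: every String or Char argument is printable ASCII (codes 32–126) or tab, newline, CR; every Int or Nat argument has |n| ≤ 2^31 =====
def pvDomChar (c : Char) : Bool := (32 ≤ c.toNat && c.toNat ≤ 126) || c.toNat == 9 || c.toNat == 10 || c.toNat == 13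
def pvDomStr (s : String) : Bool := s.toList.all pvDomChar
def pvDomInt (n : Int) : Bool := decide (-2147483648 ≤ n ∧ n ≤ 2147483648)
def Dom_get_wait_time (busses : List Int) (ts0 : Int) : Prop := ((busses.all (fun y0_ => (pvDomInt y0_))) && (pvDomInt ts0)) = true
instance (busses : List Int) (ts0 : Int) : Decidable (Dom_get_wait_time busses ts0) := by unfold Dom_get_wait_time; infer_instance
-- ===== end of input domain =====

-- B replaces A's timestamp-by-timestamp search by one pass computing each bus's wait
-- as (-ts0) % abs(b) and keeping the first minimum (objective: faster — drops the wait-proportional outer scan).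

-- ===== PORT A =====
-- A's inner for-loop: first bus b (skipping -1) with ts % b == 0
def pvFindBus (ts : Int) : List Int → Option Int
  | [] => none
  | b :: rest =>
      if b = -1 then pvFindBus ts rest
      else if PySem.Int.mod ts b = 0 then some b
      else pvFindBus ts rest

-- A's 'while True:' loop, fueled; under Pre_ the fuel below always suffices
def pvLoopA (busses : List Int) (ts0 : Int) : Nat → Int → Int
  | 0, _ => 0
  | n + 1, ts =>
      match pvFindBus ts busses with
      | some b => b * (ts - ts0)
      | none => pvLoopA busses ts0 n (ts + 1)

def get_wait_time (busses : List Int) (ts0 : Int) : Int :=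
  pvLoopA busses ts0 (busses.foldl (fun a b => max a b.natAbs) 0 + 1) ts0

-- ===== PORT B =====
-- one step of B's for-loop over the busses
def pvStepB (ts0 : Int) (best : Option (Int × Int)) (b : Int) : Option (Int × Int) :=
  if b = -1 then best
  else
    let w := PySem.Int.mod (-ts0) |b|
    match best with
    | none => some (w, b)
    | some (w0, b0) => if w < w0 then some (w, b) else some (w0, b0)

def get_wait_time_alt (busses : List Int) (ts0 : Int) : Int :=
  match busses.foldl (pvStepB ts0) none with
  | some (w, b) => b * w
  | none => 0   -- Python raises TypeError here (no bus ≠ -1); outside Pre_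

-- ===== PRECONDITION & SPEC =====
-- Pre_ excludes lists containing 0 (A may raise ZeroDivisionError, and where it still
-- returns before reaching the 0 my B raises) and lists with no bus ≠ -1 (A diverges).
def Pre_get_wait_time (busses : List Int) (ts0 : Int) : Prop :=
  (0 : Int) ∉ busses ∧ ∃ b ∈ busses, b ≠ -1
instance (busses : List Int) (ts0 : Int) : Decidable (Pre_get_wait_time busses ts0) := by
  unfold Pre_get_wait_time; infer_instance

def pvWitness_get_wait_time : List Int × Int := ([7, 13, -1, 59], 939)

def Spec_get_wait_time (busses : List Int) (ts0 : Int) (out : Int) : Prop := out = get_wait_time_alt busses ts0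
instance (busses : List Int) (ts0 : Int) (out : Int) : Decidable (Spec_get_wait_time busses ts0 out) := by unfold Spec_get_wait_time; infer_instance

-- ===== CLAIM (what is proved, stated in full; the proofs are below) =====
def Claim_equal_get_wait_time : Prop := ∀ (busses : List Int) (ts0 : Int), Dom_get_wait_time busses ts0 → Pre_get_wait_time busses ts0 → Spec_get_wait_time busses ts0 (get_wait_time busses ts0)

-- ===== LEMMAS AND PROOFS =====

-- B's loop after the accumulator became some pair (proof-side recursion mirroring the fold)
def pvGo (ts0 : Int) : Int × Int → List Int → Int × Int
  | acc, [] => acc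
  | (w0, b0), b :: l =>
      if b = -1 then pvGo ts0 (w0, b0) l
      else if PySem.Int.mod (-ts0) |b| < w0 then pvGo ts0 (PySem.Int.mod (-ts0) |b|, b) l
      else pvGo ts0 (w0, b0) l

def pvGo0 (ts0 : Int) : List Int → Option (Int × Int)
  | [] => none
  | b :: l => if b = -1 then pvGo0 ts0 l else some (pvGo ts0 (PySem.Int.mod (-ts0) |b|, b) l)

-- first bus (skipping -1) whose wait is m
def pvFirstW (ts0 m : Int) : List Int → Option Int
  | [] => none
  | b :: l =>
      if b = -1 then pvFirstW ts0 m l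
      else if PySem.Int.mod (-ts0) |b| = m then some b
      else pvFirstW ts0 m l

theorem pvFoldSome (ts0 : Int) (l : List Int) : ∀ w0 b0,
    List.foldl (pvStepB ts0) (some (w0, b0)) l = some (pvGo ts0 (w0, b0) l) := by
  induction l with
  | nil => intro w0 b0; rfl
  | cons b l ih =>
      intro w0 b0
      by_cases hb : b = -1
      · simp [pvStepB, pvGo, hb, ih]
      · by_cases hw : PySem.Int.mod (-ts0) |b| < w0
        · simp [pvStepB, pvGo, hb, hw, ih]
        · simp [pvStepB, pvGo, hb, hw, ih]

theorem pvFoldNone (ts0 : Int) (l : List Int) :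
    List.foldl (pvStepB ts0) none l = pvGo0 ts0 l := by
  induction l with
  | nil => rfl
  | cons b l ih =>
      by_cases hb : b = -1
      · simp [pvStepB, pvGo0, hb, ih]
      · simp [pvStepB, pvGo0, hb, pvFoldSome]

-- pvGo's result is a lower bound of the start wait and of every candidate's wait
theorem pvGo_min (ts0 : Int) (l : List Int) : ∀ w0 b0,
    (pvGo ts0 (w0, b0) l).1 ≤ w0 ∧
    ∀ b ∈ l, b ≠ -1 → (pvGo ts0 (w0, b0) l).1 ≤ PySem.Int.mod (-ts0) |b| := by
  induction l with
  | nil => intro w0 b0; exact ⟨le_refl _, by simp⟩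
  | cons b l ih =>
      intro w0 b0
      by_cases hb : b = -1
      · obtain ⟨h1, h2⟩ := ih w0 b0
        refine ⟨by simpa [pvGo, hb] using h1, ?_⟩
        intro c hc hcne
        rcases List.mem_cons.mp hc with hc | hc
        · exact absurd (hc.trans hb) hcne
        · simpa [pvGo, hb] using h2 c hc hcne
      · by_cases hw : PySem.Int.mod (-ts0) |b| < w0
        · obtain ⟨h1, h2⟩ := ih (PySem.Int.mod (-ts0) |b|) b
          refine ⟨by simp [pvGo, hb, hw]; exact le_of_lt (lt_of_le_of_lt h1 hw), ?_⟩
          intro c hc hcne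
          rcases List.mem_cons.mp hc with hc | hc
          · subst hc; simpa [pvGo, hb, hw] using h1
          · simpa [pvGo, hb, hw] using h2 c hc hcne
        · obtain ⟨h1, h2⟩ := ih w0 b0
          refine ⟨by simpa [pvGo, hb, hw] using h1, ?_⟩
          intro c hc hcne
          rcases List.mem_cons.mp hc with hc | hc
          · subst hc; simp [pvGo, hb, hw]; omega
          · simpa [pvGo, hb, hw] using h2 c hc hcne

-- pvGo's result is the start pair or (wait b, b) for some candidate b in l
theorem pvGo_mem (ts0 : Int) (l : List Int) : ∀ w0 b0,
    pvGo ts0 (w0, b0) l = (w0, b0) ∨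
    ∃ b ∈ l, b ≠ -1 ∧ pvGo ts0 (w0, b0) l = (PySem.Int.mod (-ts0) |b|, b) := by
  induction l with
  | nil => intro w0 b0; exact Or.inl rfl
  | cons b l ih =>
      intro w0 b0
      by_cases hb : b = -1
      · rcases ih w0 b0 with h | ⟨c, hc, hcne, heq⟩
        · exact Or.inl (by simpa [pvGo, hb] using h)
        · exact Or.inr ⟨c, List.mem_cons_of_mem _ hc, hcne, by simpa [pvGo, hb] using heq⟩
      · by_cases hw : PySem.Int.mod (-ts0) |b| < w0
        · rcases ih (PySem.Int.mod (-ts0) |b|) b with h | ⟨c, hc, hcne, heq⟩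
          · exact Or.inr ⟨b, List.mem_cons_self .., hb, by simpa [pvGo, hb, hw] using h⟩
          · exact Or.inr ⟨c, List.mem_cons_of_mem _ hc, hcne, by simpa [pvGo, hb, hw] using heq⟩
        · rcases ih w0 b0 with h | ⟨c, hc, hcne, heq⟩
          · exact Or.inl (by simpa [pvGo, hb, hw] using h)
          · exact Or.inr ⟨c, List.mem_cons_of_mem _ hc, hcne, by simpa [pvGo, hb, hw] using heq⟩

-- first-minimum property of pvGo
theorem pvGo_first (ts0 : Int) (l : List Int) : ∀ w0 b0,
    pvGo ts0 (w0, b0) l = (w0, b0) ∨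
    ((pvGo ts0 (w0, b0) l).1 < w0 ∧
      pvFirstW ts0 (pvGo ts0 (w0, b0) l).1 l = some (pvGo ts0 (w0, b0) l).2) := by
  induction l with
  | nil => intro w0 b0; exact Or.inl rfl
  | cons b l ih =>
      intro w0 b0
      by_cases hb : b = -1
      · rcases ih w0 b0 with h | ⟨h1, h2⟩
        · exact Or.inl (by simpa [pvGo, hb] using h)
        · exact Or.inr ⟨by simpa [pvGo, hb] using h1,
            by simpa [pvGo, pvFirstW, hb] using h2⟩
      · by_cases hw : PySem.Int.mod (-ts0) |b| < w0
        · have hle := (pvGo_min ts0 l (PySem.Int.mod (-ts0) |b|) b).1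
          refine Or.inr ?_
          rcases ih (PySem.Int.mod (-ts0) |b|) b with h | ⟨h1, h2⟩
          · constructor
            · simp only [pvGo, if_neg hb, if_pos hw, h]
              omega
            · simp [pvGo, pvFirstW, hb, hw, h]
          · constructor
            · simp [pvGo, hb, hw]; omega
            · have hne : ¬ PySem.Int.mod (-ts0) |b| =
                  (pvGo ts0 (PySem.Int.mod (-ts0) |b|, b) l).1 := by omega
              simp [pvGo, pvFirstW, hb, hw, hne, h2]
        · rcases ih w0 b0 with h | ⟨h1, h2⟩
          · exact Or.inl (by simpa [pvGo, hb, hw] using h)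
          · refine Or.inr ⟨by simpa [pvGo, hb, hw] using h1, ?_⟩
            have hne : ¬ PySem.Int.mod (-ts0) |b| = (pvGo ts0 (w0, b0) l).1 := by omega
            simp [pvGo, pvFirstW, hb, hw, hne, h2]

-- pvGo0 produces a value as soon as some candidate exists
theorem pvGo0_some (ts0 : Int) (l : List Int) (h : ∃ b ∈ l, b ≠ -1) :
    ∃ p, pvGo0 ts0 l = some p := by
  induction l with
  | nil => simp at h
  | cons b l ih =>
      by_cases hb : b = -1
      · obtain ⟨c, hc, hcne⟩ := h
        rcases List.mem_cons.mp hc with hc | hc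
        · exact absurd (hc.trans hb) hcne
        · simpa [pvGo0, hb] using ih ⟨c, hc, hcne⟩
      · exact ⟨pvGo ts0 (PySem.Int.mod (-ts0) |b|, b) l, by simp [pvGo0, hb]⟩

-- lifted properties of pvGo0
theorem pvGo0_min (ts0 : Int) (l : List Int) (m bb : Int)
    (h : pvGo0 ts0 l = some (m, bb)) :
    ∀ b ∈ l, b ≠ -1 → m ≤ PySem.Int.mod (-ts0) |b| := by
  induction l with
  | nil => simp [pvGo0] at h
  | cons b l ih =>
      intro c hc hcne
      by_cases hb : b = -1
      · rcases List.mem_cons.mp hc with hc | hc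
        · exact absurd (hc.trans hb) hcne
        · exact ih (by simpa [pvGo0, hb] using h) c hc hcne
      · have h' : pvGo ts0 (PySem.Int.mod (-ts0) |b|, b) l = (m, bb) := by
          simpa [pvGo0, hb] using h
        obtain ⟨h1, h2⟩ := pvGo_min ts0 l (PySem.Int.mod (-ts0) |b|) b
        rcases List.mem_cons.mp hc with hc | hc
        · subst hc; rw [h'] at h1; exact h1
        · have := h2 c hc hcne; rw [h'] at this; exact this

theorem pvGo0_mem (ts0 : Int) (l : List Int) (m bb : Int)
    (h : pvGo0 ts0 l = some (m, bb)) :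
    ∃ b ∈ l, b ≠ -1 ∧ (m, bb) = (PySem.Int.mod (-ts0) |b|, b) := by
  induction l with
  | nil => simp [pvGo0] at h
  | cons b l ih =>
      by_cases hb : b = -1
      · obtain ⟨c, hc, hcne, he⟩ := ih (by simpa [pvGo0, hb] using h)
        exact ⟨c, List.mem_cons_of_mem _ hc, hcne, he⟩
      · have h' : pvGo ts0 (PySem.Int.mod (-ts0) |b|, b) l = (m, bb) := by
          simpa [pvGo0, hb] using h
        rcases pvGo_mem ts0 l (PySem.Int.mod (-ts0) |b|) b with he | ⟨c, hc, hcne, he⟩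
        · exact ⟨b, List.mem_cons_self .., hb, by rw [h'] at he; exact he⟩
        · exact ⟨c, List.mem_cons_of_mem _ hc, hcne, by rw [h'] at he; exact he⟩

theorem pvGo0_first (ts0 : Int) (l : List Int) (m bb : Int)
    (h : pvGo0 ts0 l = some (m, bb)) :
    pvFirstW ts0 m l = some bb := by
  induction l with
  | nil => simp [pvGo0] at h
  | cons b l ih =>
      by_cases hb : b = -1
      · simpa [pvFirstW, hb] using ih (by simpa [pvGo0, hb] using h)
      · have h' : pvGo ts0 (PySem.Int.mod (-ts0) |b|, b) l = (m, bb) := by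
          simpa [pvGo0, hb] using h
        rcases pvGo_first ts0 l (PySem.Int.mod (-ts0) |b|) b with he | ⟨h1, h2⟩
        · rw [h'] at he
          have hm : m = PySem.Int.mod (-ts0) |b| := by
            have := congrArg Prod.fst he; simpa using this
          have hbb : bb = b := by
            have := congrArg Prod.snd he; simpa using this
          simp [pvFirstW, hb, hm, hbb]
        · rw [h'] at h1 h2
          have hne : ¬ PySem.Int.mod (-ts0) |b| = m := by omega
          simpa [pvFirstW, hb, hne] using h2

-- ts % b == 0 in Python is divisibility by |b| (b ≠ 0)
theorem pvMod_zero_iff (x b : Int) (_hb : b ≠ 0) :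
    PySem.Int.mod x b = 0 ↔ (|b| : Int) ∣ x := by
  rw [PySem.Int.mod_eq_zero_iff_dvd x b, abs_dvd]

theorem pvWait_nonneg_lt (ts0 b : Int) (hb : b ≠ 0) :
    0 ≤ PySem.Int.mod (-ts0) |b| ∧ PySem.Int.mod (-ts0) |b| < |b| := by
  have hpos : 0 < |b| := abs_pos.mpr hb
  rw [PySem.Int.mod_eq_emod_of_pos hpos]
  exact ⟨Int.emod_nonneg (-ts0) (by omega), Int.emod_lt_of_pos (-ts0) hpos⟩

theorem pvDvd_add_wait (ts0 b : Int) (hb : b ≠ 0) :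
    (|b| : Int) ∣ (ts0 + PySem.Int.mod (-ts0) |b|) := by
  have hpos : 0 < |b| := abs_pos.mpr hb
  rw [PySem.Int.mod_eq_emod_of_pos hpos]
  have h2 : ((-ts0) % |b| - (-ts0)) % |b| = 0 := by
    simp
  have h3 : (|b| : Int) ∣ ((-ts0) % |b| - (-ts0)) := Int.dvd_of_emod_eq_zero h2
  have : ts0 + (-ts0) % |b| = ((-ts0) % |b| - (-ts0)) := by ring
  rw [this]; exact h3

-- for 0 ≤ j ≤ wait(b): ts0+j is divisible by b exactly when j = wait(b)
theorem pvHit_iff (ts0 b j : Int) (hb : b ≠ 0) (h0 : 0 ≤ j)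
    (hle : j ≤ PySem.Int.mod (-ts0) |b|) :
    PySem.Int.mod (ts0 + j) b = 0 ↔ PySem.Int.mod (-ts0) |b| = j := by
  set w := PySem.Int.mod (-ts0) |b| with hw
  obtain ⟨hw0, hwlt⟩ := pvWait_nonneg_lt ts0 b hb
  constructor
  · intro h
    have hd : (|b| : Int) ∣ (ts0 + j) := (pvMod_zero_iff _ _ hb).mp h
    have hd2 : (|b| : Int) ∣ (w - j) := by
      have := dvd_sub (pvDvd_add_wait ts0 b hb) hd
      simpa [add_sub_add_left_eq_sub] using this
    by_contra hne
    have hlt : 0 < w - j := by omega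
    have := Int.le_of_dvd hlt hd2
    omega
  · intro h
    rw [pvMod_zero_iff _ _ hb, ← h]
    exact pvDvd_add_wait ts0 b hb

-- A's inner loop finds nothing strictly before the minimal wait
theorem pvFindBus_none (ts0 : Int) (l : List Int) (j : Int) (h0 : 0 ≤ j)
    (hz : (0 : Int) ∉ l)
    (hlt : ∀ b ∈ l, b ≠ -1 → j < PySem.Int.mod (-ts0) |b|) :
    pvFindBus (ts0 + j) l = none := by
  induction l with
  | nil => rfl
  | cons b l ih =>
      have hbz : b ≠ 0 := fun h => hz (h ▸ List.mem_cons_self ..)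
      by_cases hb : b = -1
      · simpa [pvFindBus, hb] using
          ih (fun h => hz (List.mem_cons_of_mem _ h))
             (fun c hc hcne => hlt c (List.mem_cons_of_mem _ hc) hcne)
      · have hj := hlt b (List.mem_cons_self ..) hb
        have hne : ¬ PySem.Int.mod (ts0 + j) b = 0 := by
          intro h
          have := (pvHit_iff ts0 b j hbz h0 (le_of_lt hj)).mp h
          omega
        simpa [pvFindBus, hb, hne] using
          ih (fun h => hz (List.mem_cons_of_mem _ h))
             (fun c hc hcne => hlt c (List.mem_cons_of_mem _ hc) hcne)

-- at the minimal wait m, A's inner loop finds exactly the first bus of wait m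
theorem pvFindBus_at (ts0 : Int) (l : List Int) (m : Int) (h0 : 0 ≤ m)
    (hz : (0 : Int) ∉ l)
    (hle : ∀ b ∈ l, b ≠ -1 → m ≤ PySem.Int.mod (-ts0) |b|) :
    pvFindBus (ts0 + m) l = pvFirstW ts0 m l := by
  induction l with
  | nil => rfl
  | cons b l ih =>
      have hbz : b ≠ 0 := fun h => hz (h ▸ List.mem_cons_self ..)
      have ih' := ih (fun h => hz (List.mem_cons_of_mem _ h))
        (fun c hc hcne => hle c (List.mem_cons_of_mem _ hc) hcne)
      by_cases hb : b = -1
      · simpa [pvFindBus, pvFirstW, hb] using ih'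
      · have hbm := hle b (List.mem_cons_self ..) hb
        have hiff := pvHit_iff ts0 b m hbz h0 hbm
        by_cases hh : PySem.Int.mod (-ts0) |b| = m
        · simp [pvFindBus, pvFirstW, hb, hh, hiff.mpr hh]
        · have : ¬ PySem.Int.mod (ts0 + m) b = 0 := fun h => hh (hiff.mp h)
          simpa [pvFindBus, pvFirstW, hb, hh, this] using ih'

-- running A's fueled loop from ts0 + k lands on bstar * m
theorem pvLoopA_run (busses : List Int) (ts0 m bstar : Int)
    (hz : (0 : Int) ∉ busses) (h0 : 0 ≤ m)
    (hle : ∀ b ∈ busses, b ≠ -1 → m ≤ PySem.Int.mod (-ts0) |b|)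
    (hfw : pvFirstW ts0 m busses = some bstar) :
    ∀ (n : Nat) (k : Int), 0 ≤ k → k ≤ m → m < k + n →
      pvLoopA busses ts0 n (ts0 + k) = bstar * m := by
  intro n
  induction n with
  | zero => intro k _ _ _; omega
  | succ n ih =>
      intro k hk0 hkm hmn
      by_cases hk : k = m
      · subst hk
        have := pvFindBus_at ts0 busses k hk0 hz hle
        rw [this] at *
        simp only [pvLoopA, pvFindBus_at ts0 busses k hk0 hz hle, hfw]
        ring
      · have hklt : k < m := lt_of_le_of_ne hkm hk
        have hnone : pvFindBus (ts0 + k) busses = none :=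
          pvFindBus_none ts0 busses k hk0 hz
            (fun b hb hbne => lt_of_lt_of_le hklt (hle b hb hbne))
        have hstep : ts0 + k + 1 = ts0 + (k + 1) := by ring
        simp only [pvLoopA, hnone, hstep]
        exact ih (k + 1) (by omega) (by omega) (by omega)

-- every |b| in the list is bounded by the fuel fold
theorem pvFuel_bound (l : List Int) : ∀ (a : Nat),
    a ≤ l.foldl (fun a b => max a b.natAbs) a ∧
    ∀ b ∈ l, b.natAbs ≤ l.foldl (fun a b => max a b.natAbs) a := by
  induction l with
  | nil => intro a; exact ⟨le_refl _, by simp⟩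
  | cons b l ih =>
      intro a
      obtain ⟨h1, h2⟩ := ih (max a b.natAbs)
      refine ⟨le_trans (le_max_left _ _) h1, ?_⟩
      intro c hc
      rcases List.mem_cons.mp hc with hc | hc
      · subst hc; simpa using le_trans (le_max_right a c.natAbs) h1
      · simpa using h2 c hc

-- ===== VERDICT (by name: the statement is the Claim_ definition above) =====
theorem get_wait_time_spec : Claim_equal_get_wait_time := by
  intro busses ts0 _ hpre
  obtain ⟨hz, hex⟩ := hpre
  unfold Spec_get_wait_time get_wait_time get_wait_time_alt
  obtain ⟨⟨m, bstar⟩, hgo⟩ := pvGo0_some ts0 busses hex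
  rw [pvFoldNone, hgo]
  obtain ⟨b, hb, hbne, hbeq⟩ := pvGo0_mem ts0 busses m bstar hgo
  have hbz : b ≠ 0 := fun h => hz (h ▸ hb)
  have hm : m = PySem.Int.mod (-ts0) |b| := by
    have := congrArg Prod.fst hbeq; simpa using this
  have h0 : 0 ≤ m := hm ▸ (pvWait_nonneg_lt ts0 b hbz).1
  have hmlt : m < |b| := hm ▸ (pvWait_nonneg_lt ts0 b hbz).2
  have hle := pvGo0_min ts0 busses m bstar hgo
  have hfw := pvGo0_first ts0 busses m bstar hgo
  have hfuel : m < 0 + ((busses.foldl (fun a b => max a b.natAbs) 0 + 1 : Nat) : Int) := by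
    have := (pvFuel_bound busses 0).2 b hb
    have habs : (|b| : Int) = (b.natAbs : Int) := Int.abs_eq_natAbs b
    push_cast
    omega
  have := pvLoopA_run busses ts0 m bstar hz h0 hle hfw
    (busses.foldl (fun a b => max a b.natAbs) 0 + 1) 0 (le_refl 0) h0 hfuel
  simpa using this
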